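-- pv_equiv track=rewrite | github.com/genqiaolynn/sheet_resolve | infer_choice_m.py | infer_number
-- ===== SOURCE A (Python) =====
-- def infer_number(number_list, times, interval):
--     # 默认的interval=1，题号为公差为1的等差数列
--     # 这里的times是控制递归的深度
--     if times > 30:
--         return number_list
--     new_number_list = []
--     if -1 not in number_list:
--         return number_list
--     elif number_list[-1] != -1:
--         for i in range(1, len(number_list)):
--             number = number_list[-1] - i
--             new_number_list.append(number)
--         new_number_list.append(number_list[-1])   # 最后一个肯定是不为-1的
--         new_number_list = sorted(new_number_list)
--         return new_number_list
--     else: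
--         for n_index in range(len(number_list) - 1):
--             if n_index == 0:
--                 if number_list[n_index] != -1:
--                     number_list[n_index + 1] = number_list[n_index] + interval
--             elif n_index != 0 and len(number_list) > 1 and number_list[n_index] != -1:
--                 if number_list[n_index - 1] == -1:
--                     number_list[n_index - 1] = number_list[n_index] - interval
--                 elif number_list[n_index + 1] == -1:
--                     number_list[n_index + 1] = number_list[n_index] + interval
--         times += 1
--         return infer_number(number_list, times, interval)
-- ===== SOURCE B (Python) =====
-- # Iterative re-implementation: while-loop driver, one O(n) window-scan pass that
-- # builds a fresh list (instead of index-by-index in-place mutation), and the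
-- # "last element known" case produced directly as a consecutive range instead of
-- # an append-loop followed by a sort.
-- # Note: like A, this mutates number_list in place during propagation (A writes
-- # cell by cell, B writes the whole pass result back); the equivalence proved in
-- # Lean is about the return value.
--
-- def _pass(lst, interval):
--     """One propagation pass with A's sequential left-to-right semantics,
--     expressed as a window scan (prev, cur, next) producing a new list."""
--     n = len(lst)
--     if n <= 1:
--         return lst[:]
--     out = []
--     prev = lst[0]
--     cur = prev + interval if prev != -1 else lst[1]
--     for i in range(1, n - 1):
--         nxt = lst[i + 1]
--         if cur != -1:
--             if prev == -1:
--                 prev = cur - interval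
--             elif nxt == -1:
--                 nxt = cur + interval
--         out.append(prev)
--         prev, cur = cur, nxt
--     out.append(prev)
--     out.append(cur)
--     return out
--
-- def infer_number(number_list, times, interval):
--     while times <= 30:
--         if -1 not in number_list:
--             return number_list
--         last = number_list[-1]
--         if last != -1:
--             return list(range(last - len(number_list) + 1, last + 1))
--         number_list[:] = _pass(number_list, interval)
--         times += 1
--     return number_list
-- ===== Notes on version B (the rewrite author's own statement) =====
-- stated objective: alternative
-- what changed: Recursion becomes a while loop; the in-place index-mutation propagation pass becomes an O(n) three-cell window scan building a fresh list; the 'last known' branch emits the consecutive range directly instead of appending differences and sorting.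
import Mathlib
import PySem

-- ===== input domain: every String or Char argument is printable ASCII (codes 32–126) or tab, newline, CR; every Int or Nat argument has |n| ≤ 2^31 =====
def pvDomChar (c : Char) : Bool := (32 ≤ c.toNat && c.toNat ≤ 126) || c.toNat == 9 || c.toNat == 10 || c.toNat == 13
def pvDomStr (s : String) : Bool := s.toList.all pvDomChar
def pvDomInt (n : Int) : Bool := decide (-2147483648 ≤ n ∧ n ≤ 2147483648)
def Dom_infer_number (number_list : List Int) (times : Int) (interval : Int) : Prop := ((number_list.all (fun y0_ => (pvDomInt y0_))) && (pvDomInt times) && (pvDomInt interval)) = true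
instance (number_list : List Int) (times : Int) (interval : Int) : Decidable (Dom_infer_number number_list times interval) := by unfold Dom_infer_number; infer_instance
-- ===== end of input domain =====

-- B replaces A's recursion by a while loop, the in-place indexed propagation pass by a window
-- scan that builds a new list, and the append-loop-then-sort branch by a direct consecutive
-- range. Both Pythons mutate number_list in place; the equivalence proved is about the return value.

-- ===== PORT A =====
-- body of A's propagation loop (`for n_index in range(len(number_list) - 1)`); the list is the
-- mutable state, reads/writes use pyGetD/pySetD (every index A uses is in range here)
def inferStepA (interval : Int) (l : List Int) (n_index : Int) : List Int :=
  if n_index == 0 then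
    if PySem.List.pyGetD l n_index 0 ≠ -1 then
      PySem.List.pySetD l (n_index + 1) (PySem.List.pyGetD l n_index 0 + interval)
    else l
  else if n_index ≠ 0 ∧ l.length > 1 ∧ PySem.List.pyGetD l n_index 0 ≠ -1 then
    if PySem.List.pyGetD l (n_index - 1) 0 == -1 then
      PySem.List.pySetD l (n_index - 1) (PySem.List.pyGetD l n_index 0 - interval)
    else if PySem.List.pyGetD l (n_index + 1) 0 == -1 then
      PySem.List.pySetD l (n_index + 1) (PySem.List.pyGetD l n_index 0 + interval)
    else l
  else l


def infer_number (number_list : List Int) (times : Int) (interval : Int) : List Int :=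
  if times > 30 then number_list
  else if ¬ (-1 : Int) ∈ number_list then number_list
  else if PySem.List.pyGetD number_list (-1) 0 ≠ -1 then
    let last := PySem.List.pyGetD number_list (-1) 0
    let new_number_list :=
      (PySem.List.pyRange 1 (number_list.length : Int) 1).map (fun i => last - i) ++ [last]
    PySem.List.sorted new_number_list (fun x => x) false
  else
    let nl := (PySem.List.pyRange 0 ((number_list.length : Int) - 1) 1).foldl
      (inferStepA interval) number_list
    infer_number nl (times + 1) interval
termination_by (31 - times).toNat
decreasing_by omega


-- ===== PORT B =====
-- the window-scan loop of Source B's _pass: acc holds the emitted cells in reverse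
def passLoopAlt (interval : Int) (acc : List Int) (prev cur : Int) (rest : List Int) : List Int :=
  match rest with
  | [] => acc.reverse ++ [prev, cur]
  | nxt :: rs =>
    if cur ≠ -1 then
      if prev == -1 then passLoopAlt interval ((cur - interval) :: acc) cur nxt rs
      else if nxt == -1 then passLoopAlt interval (prev :: acc) cur (cur + interval) rs
      else passLoopAlt interval (prev :: acc) cur nxt rs
    else passLoopAlt interval (prev :: acc) cur nxt rs


-- Source B's _pass
def inferPassAlt (lst : List Int) (interval : Int) : List Int :=
  match lst with
  | [] => []
  | [x] => [x]
  | x0 :: x1 :: rest =>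
    passLoopAlt interval [] x0 (if x0 ≠ -1 then x0 + interval else x1) rest


def infer_number_alt (number_list : List Int) (times : Int) (interval : Int) : List Int :=
  if times ≤ 30 then
    if ¬ (-1 : Int) ∈ number_list then number_list
    else
      let last := PySem.List.pyGetD number_list (-1) 0
      if last ≠ -1 then
        PySem.List.pyRange (last - (number_list.length : Int) + 1) (last + 1) 1
      else infer_number_alt (inferPassAlt number_list interval) (times + 1) interval
  else number_list
termination_by (31 - times).toNat
decreasing_by omega


-- ===== PRECONDITION & SPEC =====
def Spec_infer_number (number_list : List Int) (times : Int) (interval : Int) (out : List Int) : Prop := out = infer_number_alt number_list times interval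
instance (number_list : List Int) (times : Int) (interval : Int) (out : List Int) : Decidable (Spec_infer_number number_list times interval out) := by unfold Spec_infer_number; infer_instance

-- ===== CLAIM (what is proved, stated in full; the proofs are below) =====
def Claim_equal_infer_number : Prop := ∀ (number_list : List Int) (times : Int) (interval : Int), Dom_infer_number number_list times interval → Spec_infer_number number_list times interval (infer_number number_list times interval)

-- ===== LEMMAS AND PROOFS =====

lemma getD_mid (acc t : List Int) (k : Nat) :
    PySem.List.pyGetD (acc.reverse ++ t) ((acc.length : Int) + (k : Int)) 0 = t.getD k 0 := by
  have h : ((acc.length : Int) + (k : Int)) = ((acc.length + k : Nat) : Int) := by push_cast; ring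
  rw [h, PySem.List.pyGetD_natCast]
  simp [List.getD, List.getElem?_append_right (by simp : acc.reverse.length ≤ acc.length + k)]


lemma setD_mid (acc t : List Int) (k : Nat) (v : Int) :
    PySem.List.pySetD (acc.reverse ++ t) ((acc.length : Int) + (k : Int)) v = acc.reverse ++ t.set k v := by
  have h : ((acc.length : Int) + (k : Int)) = ((acc.length + k : Nat) : Int) := by push_cast; ring
  rw [h, PySem.List.pySetD_natCast]
  rw [List.set_append_right _ _ (by simp)]
  simp

theorem pass_loop_eq (interval : Int) (rest : List Int) : ∀ (acc : List Int) (prev cur : Int),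
    (PySem.List.pyRange ((acc.length : Int) + 1) ((acc.length : Int) + 1 + rest.length) 1).foldl
      (inferStepA interval) (acc.reverse ++ prev :: cur :: rest)
    = passLoopAlt interval acc prev cur rest := by
  induction rest with
  | nil =>
    intro acc prev cur
    rw [show ((acc.length : Int) + 1 + ([] : List Int).length) = (acc.length : Int) + 1 by simp]
    rw [PySem.List.pyRange_one_eq_nil le_rfl]
    simp [passLoopAlt]
  | cons nxt rs ih =>
    intro acc prev cur
    rw [PySem.List.pyRange_one_cons (by push_cast [List.length_cons]; omega)]
    rw [List.foldl_cons]
    have hM : inferStepA interval (acc.reverse ++ prev :: cur :: nxt :: rs) ((acc.length : Int) + 1)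
        = if cur ≠ -1 then
            if prev == -1 then acc.reverse ++ (cur - interval) :: cur :: nxt :: rs
            else if nxt == -1 then acc.reverse ++ prev :: cur :: (cur + interval) :: rs
            else acc.reverse ++ prev :: cur :: nxt :: rs
          else acc.reverse ++ prev :: cur :: nxt :: rs := by
      unfold inferStepA
      have h0 : PySem.List.pyGetD (acc.reverse ++ prev :: cur :: nxt :: rs) ((acc.length : Int) + 1 - 1) 0 = prev := by
        have := getD_mid acc (prev :: cur :: nxt :: rs) 0
        simpa using this
      have h1 : PySem.List.pyGetD (acc.reverse ++ prev :: cur :: nxt :: rs) ((acc.length : Int) + 1) 0 = cur := by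
        have := getD_mid acc (prev :: cur :: nxt :: rs) 1
        simpa using this
      have h2 : PySem.List.pyGetD (acc.reverse ++ prev :: cur :: nxt :: rs) ((acc.length : Int) + 1 + 1) 0 = nxt := by
        have := getD_mid acc (prev :: cur :: nxt :: rs) 2
        simpa [add_assoc] using this
      have s0 : ∀ v, PySem.List.pySetD (acc.reverse ++ prev :: cur :: nxt :: rs) ((acc.length : Int) + 1 - 1) v = acc.reverse ++ v :: cur :: nxt :: rs := by
        intro v; have := setD_mid acc (prev :: cur :: nxt :: rs) 0 v; simpa using this
      have s2 : ∀ v, PySem.List.pySetD (acc.reverse ++ prev :: cur :: nxt :: rs) ((acc.length : Int) + 1 + 1) v = acc.reverse ++ prev :: cur :: v :: rs := by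
        intro v; have := setD_mid acc (prev :: cur :: nxt :: rs) 2 v; simpa [add_assoc] using this
      rw [if_neg (by simp only [beq_iff_eq]; omega)]
      rw [h1, h0, h2]
      have hlen : (acc.reverse ++ prev :: cur :: nxt :: rs).length > 1 := by
        simp; omega
      by_cases hc : cur = -1
      · simp [hc]
      · rw [if_pos ⟨show ((acc.length : Int) + 1) ≠ 0 by omega, hlen, hc⟩]
        by_cases hp : prev = -1
        · rw [if_pos (by simp [hp]), s0]; simp [hc, hp]
        · rw [if_neg (by simp [hp])]
          by_cases hn : nxt = -1
          · rw [if_pos (by simp [hn]), s2]; simp [hc, hp, hn]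
          · rw [if_neg (by simp [hn])]; simp [hc, hp, hn]
    rw [hM]
    have ihx : ∀ (x p c : Int),
        List.foldl (inferStepA interval) ((x :: acc).reverse ++ p :: c :: rs)
          (PySem.List.pyRange ((acc.length : Int) + 1 + 1) ((acc.length : Int) + 1 + ((nxt :: rs).length : Int)) 1)
        = passLoopAlt interval (x :: acc) p c rs := by
      intro x p c
      have h := ih (x :: acc) p c
      rw [show ((acc.length : Int) + 1 + 1) = ((x :: acc).length : Int) + 1 by push_cast [List.length_cons]; ring,
          show ((acc.length : Int) + 1 + ((nxt :: rs).length : Int)) = ((x :: acc).length : Int) + 1 + (rs.length : Int) by push_cast [List.length_cons]; ring]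
      exact h
    by_cases hc : cur = -1
    · subst hc
      simp only [ne_eq, not_true_eq_false, if_false]
      rw [show acc.reverse ++ prev :: (-1 : Int) :: nxt :: rs = (prev :: acc).reverse ++ (-1 : Int) :: nxt :: rs from by simp]
      rw [ihx prev (-1) nxt]
      rw [passLoopAlt]; simp
    · by_cases hp : prev = -1
      · subst hp
        simp only [hc, ne_eq, not_false_iff, if_true, BEq.rfl, if_pos]
        rw [show acc.reverse ++ (cur - interval) :: cur :: nxt :: rs = ((cur - interval) :: acc).reverse ++ cur :: nxt :: rs from by simp]
        rw [ihx (cur - interval) cur nxt]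
        rw [passLoopAlt]; simp [hc]
      · by_cases hn : nxt = -1
        · subst hn
          simp only [hc, hp, ne_eq, not_false_iff, if_true, beq_iff_eq, if_neg, BEq.rfl, if_pos]
          rw [show acc.reverse ++ prev :: cur :: (cur + interval) :: rs = (prev :: acc).reverse ++ cur :: (cur + interval) :: rs from by simp]
          rw [ihx prev cur (cur + interval)]
          rw [passLoopAlt]; simp [hc, hp]
        · simp only [hc, hp, hn, ne_eq, not_false_iff, if_true, beq_iff_eq, if_neg]
          rw [show acc.reverse ++ prev :: cur :: nxt :: rs = (prev :: acc).reverse ++ cur :: nxt :: rs from by simp]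
          rw [ihx prev cur nxt]
          rw [passLoopAlt]; simp [hc, hp, hn]

theorem pass_eq (l : List Int) (interval : Int) :
    (PySem.List.pyRange 0 ((l.length : Int) - 1) 1).foldl (inferStepA interval) l
    = inferPassAlt l interval := by
  match l with
  | [] => rw [PySem.List.pyRange_one_eq_nil (by norm_num)]; rfl
  | [x] => rw [PySem.List.pyRange_one_eq_nil (by norm_num)]; rfl
  | x0 :: x1 :: rest =>
    rw [PySem.List.pyRange_one_cons (by push_cast [List.length_cons]; omega)]
    rw [List.foldl_cons]
    have hstep : inferStepA interval (x0 :: x1 :: rest) 0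
        = x0 :: (if x0 ≠ -1 then x0 + interval else x1) :: rest := by
      unfold inferStepA
      rw [if_pos (by simp)]
      rw [PySem.List.pyGetD_zero_cons]
      by_cases h : x0 = -1
      · simp [h]
      · rw [if_pos h]
        rw [show (0 : Int) + 1 = ((1 : Nat) : Int) by norm_num, PySem.List.pySetD_natCast]
        simp [h]
    rw [hstep]
    have h := pass_loop_eq interval rest [] x0 (if x0 ≠ -1 then x0 + interval else x1)
    simp only [List.length_nil, List.reverse_nil, List.nil_append, Nat.cast_zero, zero_add] at h
    rw [show ((x0 :: x1 :: rest).length : Int) - 1 = 1 + (rest.length : Int) by push_cast [List.length_cons]; ring]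
    exact h


theorem branch2_eq (l : List Int) (h : l ≠ []) (last : Int) :
    PySem.List.sorted
      ((PySem.List.pyRange 1 (l.length : Int) 1).map (fun i => last - i) ++ [last])
      (fun x => x) false
    = PySem.List.pyRange (last - (l.length : Int) + 1) (last + 1) 1 := by
  obtain ⟨y, ys, rfl⟩ := List.exists_cons_of_ne_nil h
  apply PySem.List.sorted_id_eq_of_perm_of_pairwise
  · have e1 : PySem.List.pyRange (last - ((y :: ys).length : Int) + 1) (last + 1) 1
        = (PySem.List.pyRange last (last - ((y :: ys).length : Int)) (-1)).reverse := by
      rw [PySem.List.pyRange_neg_one_eq_reverse, List.reverse_reverse]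
    have e2 : PySem.List.pyRange last (last - ((y :: ys).length : Int)) (-1)
        = (List.range (ys.length + 1)).map (fun k : Nat => last - (k : Int)) := by
      rw [PySem.List.pyRange_neg_one]
      have : (last - (last - ((y :: ys).length : Int))).toNat = ys.length + 1 := by
        push_cast [List.length_cons]; omega
      rw [this]
    have e3 : (List.range (ys.length + 1)).map (fun k : Nat => last - (k : Int))
        = last :: (List.range ys.length).map (fun k : Nat => last - (1 + (k : Int))) := by
      rw [List.range_succ_eq_map, List.map_cons, List.map_map]
      refine congrArg₂ _ (by norm_num) (List.map_congr_left ?_)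
      intro k _
      simp [Function.comp]
      push_cast
      ring
    have e4 : (PySem.List.pyRange 1 ((y :: ys).length : Int) 1).map (fun i => last - i)
        = (List.range ys.length).map (fun k : Nat => last - (1 + (k : Int))) := by
      rw [PySem.List.pyRange_one, List.map_map]
      have : ((((y :: ys).length : Int)) - 1).toNat = ys.length := by
        push_cast [List.length_cons]; omega
      rw [this]
      rfl
    rw [e1, e4, e2.trans e3]
    exact (List.reverse_perm _).trans (List.perm_append_singleton _ _).symm
  · have hp := PySem.List.pairwise_lt_pyRange_one (last - ((y :: ys).length : Int) + 1) (last + 1)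
    exact hp.imp le_of_lt

theorem driver_eq (nl : List Int) (t iv : Int) : infer_number nl t iv = infer_number_alt nl t iv := by
  induction nl, t using infer_number.induct iv with
  | case1 nl t h =>
    rw [infer_number, infer_number_alt]
    simp only [if_pos h, if_neg (by omega : ¬ t ≤ 30)]
  | case2 nl t h hm =>
    rw [infer_number, infer_number_alt]
    simp only [if_neg h, if_pos (by omega : t ≤ 30), if_pos hm]
  | case3 nl t h hm hlast =>
    rw [infer_number, infer_number_alt]
    simp only [if_neg h, if_pos (by omega : t ≤ 30), if_neg hm, if_pos hlast]
    exact branch2_eq nl (List.ne_nil_of_mem (by simpa using hm)) _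
  | case4 nl t h hm hlast _ ih =>
    rw [infer_number, infer_number_alt]
    simp only [if_neg h, if_pos (by omega : t ≤ 30), if_neg hm, if_neg hlast]
    rw [← pass_eq nl iv]
    exact ih

-- ===== VERDICT (by name: the statement is the Claim_ definition above) =====
theorem infer_number_spec : Claim_equal_infer_number := by
  intro number_list times interval _
  exact driver_eq number_list times interval
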